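-- pv_equiv track=rewrite | github.com/RosemarieSchoolAssign/aoc21 | 12dec.py | wrong_duplicates_pt2
-- ===== SOURCE A (Python) =====
-- def wrong_duplicates_pt2(path, visited):
--     temp = []
--     allowed_duplicate = ''
--     for i in path:
--         if i in visited:
--             if i in temp:
--                 if i != 'end' and i != 'start' and allowed_duplicate == '':
--                     allowed_duplicate = i
--                 else:
--                     return True
--             else:
--                 temp.append(i)
--     return False
-- ===== SOURCE B (Python) =====
-- def wrong_duplicates_pt2(path, visited):
--     # tally-then-analyze: count each visited cave's occurrences, then judge the counts
--     vset = set(visited)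
--     counts = {}
--     for x in path:
--         if x in vset:
--             counts[x] = counts.get(x, 0) + 1
--     doubled = 0
--     for cave, n in counts.items():
--         if n >= 2:
--             if cave == 'start' or cave == 'end':
--                 return True
--             if n >= 3:
--                 return True
--             doubled += 1
--             if doubled >= 2:
--                 return True
--     return False
-- ===== Notes on version B (the rewrite author's own statement) =====
-- stated objective: alternative
-- what changed: Replaces A's single stateful scan (seen-list plus an allowed_duplicate sentinel mutated mid-scan) with a tally-then-analyze shape: one pass builds a dict of occurrence counts for the visited caves, then a pass over the counted items judges them (start/end doubled, any count>=3, or a second doubled normal cave).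
-- outside the precondition, e.g. on wrong_duplicates_pt2(['', '', 'a', 'a'], ['', 'a']): A returns False, B returns True
import Mathlib
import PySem

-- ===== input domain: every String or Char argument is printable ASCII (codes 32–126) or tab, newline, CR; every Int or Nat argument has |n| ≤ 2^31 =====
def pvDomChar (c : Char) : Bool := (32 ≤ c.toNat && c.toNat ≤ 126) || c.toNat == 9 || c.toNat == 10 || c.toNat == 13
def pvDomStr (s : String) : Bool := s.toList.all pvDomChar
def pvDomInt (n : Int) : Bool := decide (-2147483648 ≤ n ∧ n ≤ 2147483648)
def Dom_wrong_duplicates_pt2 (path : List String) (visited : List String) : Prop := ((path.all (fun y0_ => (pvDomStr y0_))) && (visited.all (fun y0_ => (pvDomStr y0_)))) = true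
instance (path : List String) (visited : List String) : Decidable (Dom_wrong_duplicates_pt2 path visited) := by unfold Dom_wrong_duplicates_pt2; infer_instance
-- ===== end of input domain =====

-- B replaces A's single stateful scan (seen-list + allowed_duplicate sentinel mutated mid-scan)
-- by a tally-then-analyze pass over the deduplicated visited caves and their occurrence counts
-- (alternative decomposition, same asymptotic cost).


-- ===== PORT A =====
-- A's for-loop; state = (remaining path, temp, allowed_duplicate)
def pvLoopA (visited : List String) : List String → List String → String → Bool
  | [], _, _ => false
  | i :: rest, temp, allowed =>
    if i ∈ visited then
      if i ∈ temp then
        if i ≠ "end" ∧ i ≠ "start" ∧ allowed = "" then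
          pvLoopA visited rest temp i
        else true
      else pvLoopA visited rest (temp ++ [i]) allowed
    else pvLoopA visited rest temp allowed

def wrong_duplicates_pt2 (path : List String) (visited : List String) : Bool :=
  pvLoopA visited path [] ""

-- ===== PORT B =====
-- B's analysis loop over the tallied (cave, count) items, carrying the `doubled` counter
def pvBScan : List (String × Int) → Int → Bool
  | [], _ => false
  | (cave, n) :: rest, doubled =>
    if 2 ≤ n then
      if cave = "start" ∨ cave = "end" then true
      else if 3 ≤ n then true
      else if 2 ≤ doubled + 1 then true
      else pvBScan rest (doubled + 1)
    else pvBScan rest doubled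

def wrong_duplicates_pt2_alt (path : List String) (visited : List String) : Bool :=
  let vset := PySem.Set.ofList visited
  let counts := path.foldl (fun d x => if x ∈ vset then d.modify x 0 (· + 1) else d)
    PySem.Dict.empty
  pvBScan counts.items 0

-- ===== PRECONDITION & SPEC =====
-- Pre_ excludes inputs where the empty string is a visited cave duplicated in the path: there
-- A's use of '' as the allowed_duplicate sentinel makes duplicated empty-named caves never count
-- as the used-up duplicate, an accidental corner no caller would specify; B counts '' like any cave.
def Pre_wrong_duplicates_pt2 (path : List String) (visited : List String) : Prop :=
  ¬ ("" ∈ visited ∧ 2 ≤ path.count "")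
instance (path : List String) (visited : List String) : Decidable (Pre_wrong_duplicates_pt2 path visited) := by unfold Pre_wrong_duplicates_pt2; infer_instance

def pvWitness_wrong_duplicates_pt2 : List String × List String :=
  (["a", "b", "a", "start"], ["a", "b", "start"])

def Spec_wrong_duplicates_pt2 (path : List String) (visited : List String) (out : Bool) : Prop := out = wrong_duplicates_pt2_alt path visited
instance (path : List String) (visited : List String) (out : Bool) : Decidable (Spec_wrong_duplicates_pt2 path visited out) := by unfold Spec_wrong_duplicates_pt2; infer_instance

-- ===== CLAIM (what is proved, stated in full; the proofs are below) =====
def Claim_equal_wrong_duplicates_pt2 : Prop := ∀ (path : List String) (visited : List String), Dom_wrong_duplicates_pt2 path visited → Pre_wrong_duplicates_pt2 path visited → Spec_wrong_duplicates_pt2 path visited (wrong_duplicates_pt2 path visited)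

-- ===== LEMMAS AND PROOFS =====

-- A's loop on the pre-filtered list (the `i in visited` check removed)
def pvLoopA' : List String → List String → String → Bool
  | [], _, _ => false
  | i :: rest, temp, allowed =>
    if i ∈ temp then
      if i ≠ "end" ∧ i ≠ "start" ∧ allowed = "" then
        pvLoopA' rest temp i
      else true
    else pvLoopA' rest (temp ++ [i]) allowed

-- the subsequence of "duplicate events": items already seen (S = seen-so-far)
def pvEvents : List String → List String → List String
  | _, [] => []
  | S, i :: r => if i ∈ S then i :: pvEvents S r else pvEvents (S ++ [i]) r

theorem pvLoopA_filter (visited : List String) :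
    ∀ (path temp : List String) (a : String),
      pvLoopA visited path temp a = pvLoopA' (path.filter (fun x => decide (x ∈ visited))) temp a := by
  intro path
  induction path with
  | nil => intro temp a; simp [pvLoopA, pvLoopA']
  | cons i rest ih =>
    intro temp a
    simp only [pvLoopA, List.filter_cons, decide_eq_true_eq]
    by_cases hv : i ∈ visited
    · rw [if_pos hv, if_pos hv]
      simp only [pvLoopA']
      by_cases ht : i ∈ temp
      · rw [if_pos ht, if_pos ht]
        by_cases hc : i ≠ "end" ∧ i ≠ "start" ∧ a = ""
        · rw [if_pos hc, if_pos hc, ih]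
        · rw [if_neg hc, if_neg hc]
      · rw [if_neg ht, if_neg ht, ih]
    · rw [if_neg hv, if_neg hv, ih]

theorem pvEvents_subset : ∀ (S rel : List String) (x : String), x ∈ pvEvents S rel → x ∈ rel := by
  intro S rel
  induction rel generalizing S with
  | nil => simp [pvEvents]
  | cons i r ih =>
    intro x
    simp only [pvEvents]
    split_ifs with h
    · intro hx
      rcases List.mem_cons.mp hx with h1 | h2
      · simp [h1]
      · exact List.mem_cons_of_mem _ (ih S x h2)
    · intro hx; exact List.mem_cons_of_mem _ (ih _ x hx)

theorem pvEvents_count : ∀ (rel S : List String) (c : String),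
    (pvEvents S rel).count c = if c ∈ S then rel.count c else rel.count c - 1 := by
  intro rel
  induction rel with
  | nil => intro S c; simp [pvEvents]
  | cons i r ih =>
    intro S c
    simp only [pvEvents]
    by_cases hiS : i ∈ S
    · rw [if_pos hiS]
      by_cases hc : c = i
      · subst hc
        simp [ih, hiS]
      · rw [List.count_cons, List.count_cons]
        simp only [ih]
        have : ¬ (i == c) = true := by simp [Ne.symm hc]
        simp [this]
    · rw [if_neg hiS]
      by_cases hc : c = i
      · subst hc
        have hm : c ∈ S ++ [c] := by simp
        simp [ih, hm, hiS]
      · have hmem : (c ∈ S ++ [i]) = (c ∈ S) := by simp [hc]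
        rw [ih, List.count_cons]
        have : ¬ (i == c) = true := by simp [Ne.symm hc]
        simp [this, hmem]

theorem pvLoopA'_char : ∀ (rel S : List String) (a : String),
    rel.count "" ≤ 1 → ("" ∈ S → "" ∉ rel) →
    pvLoopA' rel S a =
      if a = "" then
        ((pvEvents S rel).any (fun i => i == "start" || i == "end") ||
          decide (2 ≤ (pvEvents S rel).length))
      else decide (1 ≤ (pvEvents S rel).length) := by
  intro rel
  induction rel with
  | nil => intro S a _ _; simp [pvLoopA', pvEvents]
  | cons i r ih =>
    intro S a hcnt hdisj
    have hcnt' : r.count "" ≤ 1 := by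
      rw [List.count_cons] at hcnt; omega
    simp only [pvLoopA', pvEvents]
    by_cases hiS : i ∈ S
    · have hine : i ≠ "" := by
        intro h; subst h; exact hdisj hiS (List.mem_cons_self)
      simp only [if_pos hiS]
      have hdisj' : "" ∈ S → "" ∉ r := by
        intro h; exact fun hr => hdisj h (List.mem_cons_of_mem _ hr)
      by_cases ha : a = ""
      · rw [if_pos ha]
        by_cases hse : i = "start" ∨ i = "end"
        · have : ¬ (i ≠ "end" ∧ i ≠ "start" ∧ a = "") := by tauto
          rw [if_neg this]
          have : (i == "start" || i == "end") = true := by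
            rcases hse with h | h <;> simp [h]
          simp [List.any_cons, this]
        · rw [not_or] at hse
          have hcond : i ≠ "end" ∧ i ≠ "start" ∧ a = "" := ⟨hse.2, hse.1, ha⟩
          rw [if_pos hcond, ih S i hcnt' hdisj']
          rw [if_neg hine]
          have hp : (i == "start" || i == "end") = false := by
            simp [hse.1, hse.2]
          simp only [List.any_cons, hp, Bool.false_or, List.length_cons]
          cases hE : pvEvents S r with
          | nil => simp
          | cons y ys => simp
      · rw [if_neg ha]
        have : ¬ (i ≠ "end" ∧ i ≠ "start" ∧ a = "") := by tauto
        rw [if_neg this]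
        simp
    · simp only [if_neg hiS]
      have hdisj' : "" ∈ S ++ [i] → "" ∉ r := by
        intro h
        rcases List.mem_append.mp h with h1 | h2
        · exact fun hr => hdisj h1 (List.mem_cons_of_mem _ hr)
        · have hie : i = "" := by simpa using h2
          subst hie
          intro hr
          rw [List.count_cons] at hcnt
          have : 1 ≤ r.count "" := List.count_pos_iff.mpr hr
          simp at hcnt; omega
      exact ih (S ++ [i]) a hcnt' hdisj'

theorem pvAnySE : ∀ (l : List String),
    l.any (fun i => i == "start" || i == "end") = (decide ("start" ∈ l) || decide ("end" ∈ l)) := by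
  intro l
  induction l with
  | nil => simp
  | cons x xs ih =>
    simp only [List.any_cons, ih, List.mem_cons]
    by_cases h1 : x = "start"
    · simp [h1]
    · by_cases h2 : x = "end"
      · simp [h2]
      · have e1 : (x == "start") = false := by simpa using h1
        have e2 : (x == "end") = false := by simpa using h2
        simp [e1, e2, Ne.symm h1, Ne.symm h2]

theorem pvFoldFilter {β : Type} (p : String → Prop) [DecidablePred p] (g : β → String → β) :
    ∀ (l : List String) (d : β),
      l.foldl (fun d x => if p x then g d x else d) d =
        (l.filter (fun x => decide (p x))).foldl g d := by
  intro l
  induction l with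
  | nil => intro d; simp
  | cons x r ih =>
    intro d
    simp only [List.foldl_cons, List.filter_cons]
    by_cases h : p x
    · rw [if_pos h, if_pos (by simpa using h), List.foldl_cons, ih]
    · rw [if_neg h, if_neg (by simpa using h), ih]

theorem pvCoverSum : ∀ (caves l : List String), caves.Nodup → (∀ x ∈ l, x ∈ caves) →
    l.length = (caves.map (fun c => l.count c)).sum := by
  intro caves
  induction caves with
  | nil =>
    intro l _ hcov
    cases l with
    | nil => simp
    | cons x xs => exact absurd (hcov x (List.mem_cons_self)) (List.not_mem_nil)
  | cons c rest ih =>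
    intro l hnd hcov
    have hnd' : rest.Nodup := (List.nodup_cons.mp hnd).2
    have hcns : c ∉ rest := (List.nodup_cons.mp hnd).1
    have hsplit : l.length = l.count c + (l.filter (fun x => ¬ x = c)).length := by
      rw [List.count_eq_countP, List.length_eq_countP_add_countP (p := fun x => x == c) (l := l),
          ← List.countP_eq_length_filter]
      congr 1
      apply List.countP_congr
      intro x _; simp
    rw [hsplit, List.map_cons, List.sum_cons]
    congr 1
    have hcov' : ∀ x ∈ l.filter (fun x => ¬ x = c), x ∈ rest := by
      intro x hx
      have hmem := List.mem_of_mem_filter hx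
      have hne : ¬ x = c := by
        have := List.of_mem_filter hx; simpa using this
      rcases List.mem_cons.mp (hcov x hmem) with h | h
      · exact absurd h hne
      · exact h
    rw [ih _ hnd' hcov']
    congr 1
    apply List.map_congr_left
    intro c' hc'
    have : (fun x => decide (¬ x = c)) c' = true := by
      simp
      intro h; exact hcns (h ▸ hc')
    exact List.count_filter this

theorem pvSumNormal : ∀ (caves : List String) (f : String → ℕ),
    (∀ c ∈ caves, (c = "start" ∨ c = "end") → f c = 0) →
    (caves.map f).sum = ((caves.filter (fun c => ¬ (c = "start" ∨ c = "end"))).map f).sum := by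
  intro caves
  induction caves with
  | nil => intro f _; simp
  | cons c rest ih =>
    intro f h
    have hrest : ∀ c ∈ rest, (c = "start" ∨ c = "end") → f c = 0 := by
      intro c' hc'; exact h c' (List.mem_cons_of_mem _ hc')
    by_cases hse : c = "start" ∨ c = "end"
    · rw [List.map_cons, List.sum_cons, h c (List.mem_cons_self) hse, List.filter_cons]
      have : ¬ (fun c => decide (¬ (c = "start" ∨ c = "end"))) c = true := by
        simp only [decide_eq_true_eq]; exact not_not_intro hse
      rw [if_neg this, ih f hrest]
      simp
    · rw [List.map_cons, List.sum_cons, List.filter_cons]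
      have : (fun c => decide (¬ (c = "start" ∨ c = "end"))) c = true := by simpa using hse
      rw [if_pos this, List.map_cons, List.sum_cons, ih f hrest]

theorem pvBScan_char : ∀ (rel caves : List String) (d : Int), (d = 0 ∨ d = 1) →
    pvBScan (caves.map (fun c => (c, (rel.count c : Int)))) d =
      (decide (∃ c ∈ caves, (c = "start" ∨ c = "end") ∧ 2 ≤ rel.count c) ||
        decide (2 ≤ d.toNat +
          ((caves.filter (fun c => ¬ (c = "start" ∨ c = "end"))).map (fun c => rel.count c - 1)).sum)) := by
  intro rel caves
  induction caves with
  | nil =>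
    intro d hd
    rcases hd with h | h <;> subst h <;> simp [pvBScan]
  | cons cave rest ih =>
    intro d hd
    have hex : (∃ c ∈ cave :: rest, (c = "start" ∨ c = "end") ∧ 2 ≤ rel.count c) ↔
        ((cave = "start" ∨ cave = "end") ∧ 2 ≤ rel.count cave) ∨
          (∃ c ∈ rest, (c = "start" ∨ c = "end") ∧ 2 ≤ rel.count c) := by
      constructor
      · rintro ⟨c, hc, hp⟩
        rcases List.mem_cons.mp hc with h | h
        · exact Or.inl (h ▸ hp)
        · exact Or.inr ⟨c, h, hp⟩
      · rintro (hp | ⟨c, hc, hp⟩)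
        · exact ⟨cave, List.mem_cons_self, hp⟩
        · exact ⟨c, List.mem_cons_of_mem _ hc, hp⟩
    rw [List.map_cons]
    simp only [pvBScan]
    by_cases h2 : (2 : ℕ) ≤ rel.count cave
    · rw [if_pos (by exact_mod_cast h2)]
      by_cases hse : cave = "start" ∨ cave = "end"
      · rw [if_pos hse]
        have hT : (∃ c ∈ cave :: rest, (c = "start" ∨ c = "end") ∧ 2 ≤ rel.count c) :=
          ⟨cave, List.mem_cons_self, hse, h2⟩
        rw [decide_eq_true hT, Bool.true_or]
      · rw [if_neg hse]
        have hfc : (cave :: rest).filter (fun c => ¬ (c = "start" ∨ c = "end")) =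
            cave :: rest.filter (fun c => ¬ (c = "start" ∨ c = "end")) := by
          rw [List.filter_cons, if_pos (by simpa using hse)]
        by_cases h3 : (3 : ℕ) ≤ rel.count cave
        · rw [if_pos (by exact_mod_cast h3)]
          have hT : 2 ≤ d.toNat + (((cave :: rest).filter (fun c => ¬ (c = "start" ∨ c = "end"))).map
              (fun c => rel.count c - 1)).sum := by
            rw [hfc, List.map_cons, List.sum_cons]
            omega
          rw [decide_eq_true hT, Bool.or_true]
        · rw [if_neg (by exact_mod_cast h3)]
          have hn2 : rel.count cave = 2 := by omega
          rcases hd with hd0 | hd1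
          · subst hd0
            rw [if_neg (by norm_num), zero_add, ih 1 (Or.inr rfl)]
            rw [← Bool.decide_or, ← Bool.decide_or, decide_eq_decide]
            rw [hex, hfc, List.map_cons, List.sum_cons, hn2]
            generalize ((rest.filter (fun c => ¬ (c = "start" ∨ c = "end"))).map
              (fun c => rel.count c - 1)).sum = s
            constructor
            · rintro (h | h)
              · exact Or.inl (Or.inr h)
              · right; omega
            · rintro ((⟨hSE, _⟩ | h) | h)
              · exact absurd hSE hse
              · exact Or.inl h
              · right; omega
          · subst hd1
            rw [if_pos (by norm_num)]
            have hT : 2 ≤ (1 : Int).toNat + (((cave :: rest).filter (fun c => ¬ (c = "start" ∨ c = "end"))).map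
                (fun c => rel.count c - 1)).sum := by
              rw [hfc, List.map_cons, List.sum_cons, hn2]
              omega
            rw [decide_eq_true hT, Bool.or_true]
    · rw [if_neg (by exact_mod_cast h2)]
      rw [ih d hd]
      rw [← Bool.decide_or, ← Bool.decide_or, decide_eq_decide]
      rw [hex, List.filter_cons]
      by_cases hse : cave = "start" ∨ cave = "end"
      · rw [if_neg (by simp only [decide_eq_true_eq]; exact not_not_intro hse)]
        constructor
        · rintro (h | h)
          · exact Or.inl (Or.inr h)
          · exact Or.inr h
        · rintro ((⟨_, hc2⟩ | h) | h)
          · exact absurd hc2 h2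
          · exact Or.inl h
          · exact Or.inr h
      · rw [if_pos (by simpa using hse), List.map_cons, List.sum_cons]
        have hz : rel.count cave - 1 = 0 := by omega
        rw [hz, Nat.zero_add]
        constructor
        · rintro (h | h)
          · exact Or.inl (Or.inr h)
          · exact Or.inr h
        · rintro ((⟨_, hc2⟩ | h) | h)
          · exact absurd hc2 h2
          · exact Or.inl h
          · exact Or.inr h

-- ===== VERDICT (by name: the statement is the Claim_ definition above) =====
theorem wrong_duplicates_pt2_spec : Claim_equal_wrong_duplicates_pt2 := by
  intro path visited _ hpre
  show wrong_duplicates_pt2 path visited = wrong_duplicates_pt2_alt path visited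
  unfold wrong_duplicates_pt2
  rw [pvLoopA_filter]
  set rel := path.filter (fun x => decide (x ∈ visited)) with hrel
  have halt : wrong_duplicates_pt2_alt path visited =
      pvBScan (PySem.Dict.counter rel).items 0 := by
    show pvBScan ((path.foldl
        (fun d x => if x ∈ PySem.Set.ofList visited then d.modify x 0 (· + 1) else d)
        PySem.Dict.empty)).items 0 = _
    have h1 := pvFoldFilter (fun x => x ∈ PySem.Set.ofList visited)
      (fun d x => PySem.Dict.modify d x 0 (· + 1)) path
      (PySem.Dict.empty (κ := String) (ν := Int))
    have h2 : (path.filter (fun x => decide (x ∈ PySem.Set.ofList visited))).foldl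
        (fun d x => PySem.Dict.modify d x 0 (· + 1)) PySem.Dict.empty
        = PySem.Dict.counter rel := by
      rw [PySem.Dict.counter_eq_foldl]
      congr 1
      apply List.filter_congr
      intro x _
      simp [PySem.Set.mem_ofList]
    rw [h1.trans h2]
  rw [halt, PySem.Dict.items_counter]
  have hcnt : rel.count "" ≤ 1 := by
    by_cases hv : "" ∈ visited
    · have hle : rel.count "" ≤ path.count "" :=
        (List.filter_sublist (p := fun x => decide (x ∈ visited)) (l := path)).count_le ""
      have h2 : ¬ 2 ≤ path.count "" := fun h => hpre ⟨hv, h⟩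
      omega
    · have hnm : "" ∉ rel := by
        intro h
        have := List.mem_filter.mp h
        exact hv (by simpa using this.2)
      have := List.count_eq_zero.mpr hnm
      omega
  rw [pvLoopA'_char rel [] "" hcnt (by simp)]
  rw [if_pos rfl, pvAnySE]
  rw [pvBScan_char rel (PySem.Set.ofList rel) 0 (Or.inl rfl)]
  have hnd : (PySem.Set.ofList rel).Nodup := PySem.Set.nodup_ofList rel
  have hmemc : ∀ x : String, x ∈ PySem.Set.ofList rel ↔ x ∈ rel := fun x =>
    PySem.Set.mem_ofList rel x
  have hcovE : ∀ x ∈ pvEvents [] rel, x ∈ PySem.Set.ofList rel := by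
    intro x hx; exact (hmemc x).mpr (pvEvents_subset [] rel x hx)
  have hlen : (pvEvents [] rel).length =
      ((PySem.Set.ofList rel).map (fun c => rel.count c - 1)).sum := by
    rw [pvCoverSum (PySem.Set.ofList rel) (pvEvents [] rel) hnd hcovE]
    congr 1
    apply List.map_congr_left
    intro c _
    rw [pvEvents_count]
    simp
  have hs : ("start" ∈ pvEvents [] rel) ↔ 2 ≤ rel.count "start" := by
    rw [← List.count_pos_iff, pvEvents_count]
    simp only [List.not_mem_nil, if_false]
    omega
  have he : ("end" ∈ pvEvents [] rel) ↔ 2 ≤ rel.count "end" := by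
    rw [← List.count_pos_iff, pvEvents_count]
    simp only [List.not_mem_nil, if_false]
    omega
  rw [← Bool.decide_or, ← Bool.decide_or, ← Bool.decide_or, decide_eq_decide]
  rw [hs, he, hlen]
  by_cases hSE : 2 ≤ rel.count "start" ∨ 2 ≤ rel.count "end"
  · have hR : ∃ c ∈ PySem.Set.ofList rel, (c = "start" ∨ c = "end") ∧ 2 ≤ rel.count c := by
      rcases hSE with h | h
      · exact ⟨"start", (hmemc "start").mpr (List.count_pos_iff.mp (by omega)), Or.inl rfl, h⟩
      · exact ⟨"end", (hmemc "end").mpr (List.count_pos_iff.mp (by omega)), Or.inr rfl, h⟩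
    exact iff_of_true (Or.inl hSE) (Or.inl hR)
  · rw [not_or] at hSE
    rw [Nat.not_le, Nat.not_le] at hSE
    have hsum : ((PySem.Set.ofList rel).map (fun c => rel.count c - 1)).sum =
        (((PySem.Set.ofList rel).filter (fun c => ¬ (c = "start" ∨ c = "end"))).map
          (fun c => rel.count c - 1)).sum := by
      apply pvSumNormal
      intro c _ hcse
      rcases hcse with h | h <;> subst h <;> omega
    have hnoex : ¬ ∃ c ∈ PySem.Set.ofList rel, (c = "start" ∨ c = "end") ∧ 2 ≤ rel.count c := by
      rintro ⟨c, _, hcse, hc2⟩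
      rcases hcse with h | h <;> subst h <;> omega
    rw [hsum]
    constructor
    · rintro ((h | h) | h)
      · omega
      · omega
      · right; omega
    · rintro (h | h)
      · exact absurd h hnoex
      · right; omega
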